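-- pv_equiv track=rewrite | github.com/mak989063/python-core-concepts | DSA/string_man_2_dsa.py | solve
-- ===== SOURCE A (Python) =====
-- def solve(A):
--     str_dup = A + A
--     vowels = ['a', 'e', 'i', 'o', 'u']
--     result  = ""
--
--     for ch in str_dup:
--         if ch.isupper():
--             continue
--         elif ch in vowels:
--             result += "#"
--         else:
--             result += ch
--
--     return result
-- ===== SOURCE B (Python) =====
-- def solve(A):
--     # Divide and conquer: the per-character transform is position-independent,
--     # so it distributes over concatenation; recurse on halves, then double.
--     def transform(s):
--         if len(s) == 0:
--             return ""
--         if len(s) == 1: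
--             if s.isupper():
--                 return ""
--             return "#" if s in "aeiou" else s
--         m = len(s) // 2
--         return transform(s[:m]) + transform(s[m:])
--     t = transform(A)
--     return t + t
-- ===== Notes on version B (the rewrite author's own statement) =====
-- stated objective: alternative
-- what changed: B replaces A's single linear loop over the doubled string A+A with a divide-and-conquer recursion: transform(s) splits s in half and concatenates the transformed halves (base case: one character is dropped if uppercase, '#' if a lowercase vowel, else kept), exploiting that the position-independent map distributes over concatenation; the transformed half is then doubled.
import Mathlib
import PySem

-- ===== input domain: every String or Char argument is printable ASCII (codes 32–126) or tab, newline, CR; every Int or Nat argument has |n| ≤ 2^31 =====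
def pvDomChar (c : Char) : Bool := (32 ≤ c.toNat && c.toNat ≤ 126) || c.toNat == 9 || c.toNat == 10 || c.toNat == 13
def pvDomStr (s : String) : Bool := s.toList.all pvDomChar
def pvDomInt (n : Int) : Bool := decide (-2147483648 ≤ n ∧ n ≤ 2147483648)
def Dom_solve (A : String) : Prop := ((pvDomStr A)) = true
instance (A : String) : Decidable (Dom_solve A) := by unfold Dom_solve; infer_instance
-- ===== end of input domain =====

-- B: divide-and-conquer recursion on halves (the map distributes over concatenation),
-- then double the transformed half; A loops once over A+A. Alternative decomposition, not claimed faster.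

-- ===== PORT A =====
-- loop over str_dup = A + A, building `result` char by char (result kept as List Char)
def solve (A : String) : String :=
  String.ofList ((A.toList ++ A.toList).foldl
    (fun acc ch =>
      if PySem.Chars.isupper ch then acc
      else if ch ∈ ['a', 'e', 'i', 'o', 'u'] then acc ++ ['#']
      else acc ++ [ch]) [])

-- ===== PORT B =====
-- transform(s): recurse on the two halves (s[:m], s[m:] ported as take/drop, exact for 0 ≤ m ≤ len);
-- structural recursion on a fuel = length bound (each half is strictly shorter, so the fuel suffices)
def transformBFuel : Nat → List Char → List Char
  | 0, _ => []
  | fuel + 1, l =>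
    if l.length = 0 then []
    else if l.length = 1 then
      match l with
      | [ch] =>
        if PySem.Chars.isupper ch then []
        else if ch ∈ ['a', 'e', 'i', 'o', 'u'] then ['#'] else [ch]
      | _ => []
    else
      transformBFuel fuel (l.take (l.length / 2)) ++ transformBFuel fuel (l.drop (l.length / 2))

def transformB (l : List Char) : List Char := transformBFuel l.length l

def solve_alt (A : String) : String :=
  let t := transformB A.toList
  String.ofList (t ++ t)

-- ===== PRECONDITION & SPEC =====
def Spec_solve (A : String) (out : String) : Prop := out = solve_alt A
instance (A : String) (out : String) : Decidable (Spec_solve A out) := by unfold Spec_solve; infer_instance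

-- ===== CLAIM (what is proved, stated in full; the proofs are below) =====
def Claim_equal_solve : Prop := ∀ (A : String), Dom_solve A → Spec_solve A (solve A)

-- ===== LEMMAS AND PROOFS =====

-- the common specification both ports meet on one copy of the input
def pvFM (l : List Char) : List Char :=
  (l.filter (fun ch => !PySem.Chars.isupper ch)).map
    (fun ch => if ch ∈ ['a', 'e', 'i', 'o', 'u'] then '#' else ch)

theorem pvFM_append (l₁ l₂ : List Char) : pvFM (l₁ ++ l₂) = pvFM l₁ ++ pvFM l₂ := by
  simp [pvFM]

-- A's fold appends exactly the transformed non-uppercase chars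
theorem solve_foldl_eq (l acc : List Char) :
    l.foldl (fun acc ch =>
      if PySem.Chars.isupper ch then acc
      else if ch ∈ ['a', 'e', 'i', 'o', 'u'] then acc ++ ['#']
      else acc ++ [ch]) acc = acc ++ pvFM l := by
  induction l generalizing acc with
  | nil => simp [pvFM]
  | cons c t ih =>
    by_cases h : PySem.Chars.isupper c
    · rw [List.foldl_cons, if_pos h, ih]; simp [pvFM, h]
    · by_cases hv : c ∈ ['a', 'e', 'i', 'o', 'u']
      · rw [List.foldl_cons, if_neg h, if_pos hv, ih]
        simp only [List.mem_cons, List.not_mem_nil, or_false] at hv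
        simp [pvFM, h, hv]
      · rw [List.foldl_cons, if_neg h, if_neg hv, ih]
        simp only [List.mem_cons, List.not_mem_nil, or_false] at hv
        simp [pvFM, h, hv]

-- B's divide-and-conquer computes the same transform (induction on the fuel)
theorem transformBFuel_eq (fuel : Nat) : ∀ l : List Char, l.length ≤ fuel →
    transformBFuel fuel l = pvFM l := by
  induction fuel with
  | zero =>
    intro l h
    rw [List.length_eq_zero_iff.mp (Nat.le_zero.mp h)]
    simp [transformBFuel, pvFM]
  | succ n ih =>
    intro l hl
    by_cases h0 : l.length = 0
    · simp [transformBFuel, List.length_eq_zero_iff.mp h0, pvFM]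
    · by_cases h1 : l.length = 1
      · obtain ⟨ch, rfl⟩ := List.length_eq_one_iff.mp h1
        by_cases h : PySem.Chars.isupper ch
        · simp [transformBFuel, pvFM, h]
        · by_cases hv : ch ∈ ['a', 'e', 'i', 'o', 'u'] <;> simp_all [transformBFuel, pvFM]
      · rw [transformBFuel, if_neg h0, if_neg h1,
            ih (l.take (l.length / 2)) (by simp only [List.length_take]; omega),
            ih (l.drop (l.length / 2)) (by simp only [List.length_drop]; omega),
            ← pvFM_append, List.take_append_drop]
        intro ch hch
        exact h1 (by simp [hch])

theorem transformB_eq (l : List Char) : transformB l = pvFM l :=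
  transformBFuel_eq l.length l (le_refl _)

-- ===== VERDICT (by name: the statement is the Claim_ definition above) =====
theorem solve_spec : Claim_equal_solve := by
  intro A _
  show solve A = solve_alt A
  simp only [solve, solve_alt, solve_foldl_eq, transformB_eq, List.nil_append, pvFM_append]
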